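-- pv_equiv track=rewrite | github.com/JamesWo/Algorithms | topcoder/division2-2/HappyLetterDiv2.py | getHappyLetter
-- ===== SOURCE A (Python) =====
-- def getHappyLetter(letters):
--     counts = {}
--     maxCountLetter = None
--     maxCount = 0
--     for letter in letters:
--         if letter in counts:
--             counts[letter]+=1
--         else:
--             counts[letter]=1
--         if counts[letter] > maxCount:
--             maxCount = counts[letter]
--             maxCountLetter = letter
--     counts.pop(maxCountLetter)
--     rest = sum( counts.values() )
--     if maxCount > rest:
--         return maxCountLetter
--     else:
--         return "."
-- ===== SOURCE B (Python) =====
-- def getHappyLetter(letters):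
--     # Sort the letters so equal letters are adjacent, then scan runs: the
--     # longest run is the mode; it is the happy letter iff it covers a strict
--     # majority of the string.
--     s = sorted(letters)
--     best = None
--     bestLen = 0
--     i = 0
--     n = len(s)
--     while i < n:
--         j = i
--         while j < n and s[j] == s[i]:
--             j += 1
--         if j - i > bestLen:
--             best = s[i]
--             bestLen = j - i
--         i = j
--     return best if 2 * bestLen > len(letters) else "."
-- ===== Notes on version B (the rewrite author's own statement) =====
-- stated objective: alternative
-- what changed: A builds a hash-map of counts while tracking the running maximum and pops the winner to sum the rest; B uses no dictionary at all: it sorts the string and scans it for the longest run of equal letters, returning that letter iff twice the run length exceeds the string length (the happy letter, when it exists, is the unique mode, so A's first-to-reach-max tie-break never matters).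
import Mathlib
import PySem

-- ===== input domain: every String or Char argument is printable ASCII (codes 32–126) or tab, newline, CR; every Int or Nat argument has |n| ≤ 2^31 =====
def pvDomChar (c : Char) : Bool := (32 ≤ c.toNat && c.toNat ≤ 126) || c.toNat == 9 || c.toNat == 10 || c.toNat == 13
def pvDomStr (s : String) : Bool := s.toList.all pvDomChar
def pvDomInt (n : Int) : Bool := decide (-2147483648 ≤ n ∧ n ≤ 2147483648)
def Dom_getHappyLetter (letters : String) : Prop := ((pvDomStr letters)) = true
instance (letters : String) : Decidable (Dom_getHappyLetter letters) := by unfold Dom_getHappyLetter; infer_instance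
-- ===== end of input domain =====

-- B drops A's dictionary entirely: it sorts the string and scans it for the longest run
-- of equal letters (the mode), a genuinely different algorithm of similar cost.

-- ===== PORT A =====
-- A's loop body: update counts (membership check, then += 1 / = 1), then the running max and its letter.
def pvStepA (st : PySem.Dict Char Int × Option Char × Int) (letter : Char) :
    PySem.Dict Char Int × Option Char × Int :=
  let counts :=
    if st.1.contains letter then st.1.modify letter 0 (· + 1)
    else st.1.insert letter 1
  if counts.getD letter 0 > st.2.2 then (counts, some letter, counts.getD letter 0)
  else (counts, st.2.1, st.2.2)

def getHappyLetter (letters : String) : String :=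
  let st := letters.toList.foldl pvStepA (PySem.Dict.empty, none, 0)
  match st.2.1 with
  | none => ""            -- counts.pop(None): KeyError — only the empty string, excluded by Pre_
  | some l =>
    match st.1.pop? l with
    | none => ""          -- KeyError branch of dict.pop (never reached: l is a key of counts)
    | some (_, counts) =>
      let rest := counts.values.sum
      if st.2.2 > rest then String.singleton l else "."

-- ===== PORT B =====
-- B's outer while loop over the sorted list: each iteration consumes one maximal run
-- (the inner 'while s[j] == s[i]' is the takeWhile; 'i = j' is the dropWhile) and keeps
-- the best (letter, run length) seen.  Fuel = list length (structural, so the kernel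
-- can reduce it); the length always suffices since each step consumes ≥ 1 element.
def pvBestRunGo : Nat → List Char → Option Char × Int → Option Char × Int
  | 0, _, st => st
  | _ + 1, [], st => st
  | fuel + 1, c :: rest, st =>
    let runLen : Int := ((rest.takeWhile (· == c)).length : Int) + 1
    let st' := if runLen > st.2 then (some c, runLen) else st
    pvBestRunGo fuel (rest.dropWhile (· == c)) st'

def getHappyLetter_alt (letters : String) : String :=
  let s := PySem.List.sorted letters.toList (fun x => x) false
  let r := pvBestRunGo s.length s (none, 0)
  if 2 * r.2 > PySem.Str.len letters then
    match r.1 with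
    | some b => String.singleton b
    | none => ""          -- unreachable: the condition forces a nonempty best run
  else "."

-- ===== PRECONDITION & SPEC =====
-- On the empty string A raises KeyError (counts.pop(None)) — so it is excluded.
def Pre_getHappyLetter (letters : String) : Prop := letters ≠ ""
instance (letters : String) : Decidable (Pre_getHappyLetter letters) := by unfold Pre_getHappyLetter; infer_instance
def pvWitness_getHappyLetter : String := "aab"

def Spec_getHappyLetter (letters : String) (out : String) : Prop := out = getHappyLetter_alt letters
instance (letters : String) (out : String) : Decidable (Spec_getHappyLetter letters out) := by unfold Spec_getHappyLetter; infer_instance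

-- ===== CLAIM (what is proved, stated in full; the proofs are below) =====
def Claim_equal_getHappyLetter : Prop := ∀ (letters : String), Dom_getHappyLetter letters → Pre_getHappyLetter letters → Spec_getHappyLetter letters (getHappyLetter letters)

-- ===== LEMMAS AND PROOFS =====

-- ----- A side -----

-- one step of A's loop on a state whose dict is Counter(xs)
lemma pvStepA_counter (xs : List Char) (ml : Option Char) (m : Int) (c : Char) :
    pvStepA (PySem.Dict.counter xs, ml, m) c =
      (PySem.Dict.counter (xs ++ [c]),
       if ((xs.count c : Int) + 1 > m) then some c else ml,
       if ((xs.count c : Int) + 1 > m) then ((xs.count c : Int) + 1) else m) := by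
  have hdict : (if (PySem.Dict.counter xs).contains c then (PySem.Dict.counter xs).modify c 0 (· + 1)
      else (PySem.Dict.counter xs).insert c 1) = PySem.Dict.counter (xs ++ [c]) := by
    rw [PySem.Dict.counter_append_singleton]
    by_cases h : (PySem.Dict.counter xs).contains c
    · simp [h]
    · simp only [h, Bool.false_eq_true, if_false, PySem.Dict.modify,
        PySem.Dict.getD_of_not_contains _ _ (by simpa using h)]
      norm_num
  have hval : (PySem.Dict.counter (xs ++ [c])).getD c 0 = (xs.count c : Int) + 1 := by
    simp [PySem.Dict.getD_counter, List.count_append]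
  unfold pvStepA
  simp only [hdict, hval]
  by_cases hgt : (xs.count c : Int) + 1 > m <;> simp [hgt]

-- invariant of A's loop: the dict is Counter(prefix); the running max dominates every
-- count and is realised by the recorded letter (which exists iff the prefix is nonempty)
lemma pvFoldA_inv (xs : List Char) :
    (xs.foldl pvStepA (PySem.Dict.empty, none, 0)).1 = PySem.Dict.counter xs ∧
    (((xs.foldl pvStepA (PySem.Dict.empty, none, 0)).2.1 = none ∧ xs = []) ∨
     (∃ l, (xs.foldl pvStepA (PySem.Dict.empty, none, 0)).2.1 = some l ∧
        ((xs.count l : Int) = (xs.foldl pvStepA (PySem.Dict.empty, none, 0)).2.2) ∧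
        (∀ k, (xs.count k : Int) ≤ (xs.foldl pvStepA (PySem.Dict.empty, none, 0)).2.2) ∧
        1 ≤ (xs.foldl pvStepA (PySem.Dict.empty, none, 0)).2.2)) := by
  induction xs using List.reverseRecOn with
  | nil => exact ⟨rfl, Or.inl ⟨rfl, rfl⟩⟩
  | append_singleton xs c ih =>
    obtain ⟨hd, hinv⟩ := ih
    have hst : xs.foldl pvStepA (PySem.Dict.empty, none, 0)
        = (PySem.Dict.counter xs, (xs.foldl pvStepA (PySem.Dict.empty, none, 0)).2.1,
           (xs.foldl pvStepA (PySem.Dict.empty, none, 0)).2.2) := by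
      rw [← hd]
    rw [List.foldl_append, List.foldl_cons, List.foldl_nil, hst, pvStepA_counter]
    set ml := (xs.foldl pvStepA (PySem.Dict.empty, none, 0)).2.1
    set m := (xs.foldl pvStepA (PySem.Dict.empty, none, 0)).2.2
    have hcnt : ∀ k : Char, (xs ++ [c]).count k = xs.count k + if k = c then 1 else 0 := by
      intro k
      have : ∀ _ : ¬ k = c, ¬ c = k := fun h h2 => h h2.symm
      by_cases hkc : k = c <;> simp [List.count_append, hkc, this]
    refine ⟨rfl, ?_⟩
    by_cases hgt : (xs.count c : Int) + 1 > m
    · refine Or.inr ⟨c, ?_, ?_, ?_, ?_⟩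
      · simp [hgt]
      · simp [hgt, hcnt c]
      · intro k
        simp only [hgt, if_pos, hcnt k]
        rcases hinv with ⟨_, hnil⟩ | ⟨l, _, hcl, hall, h1⟩
        · subst hnil
          by_cases hkc : k = c <;> simp [hkc]
        · have := hall k
          by_cases hkc : k = c <;> simp [hkc] <;> push_cast <;> omega
      · simp only [hgt, if_pos]
        have : (0:Int) ≤ (xs.count c : Int) := by positivity
        omega
    · rcases hinv with ⟨hnone, hnil⟩ | ⟨l, hsome, hcl, hall, h1⟩
      · exfalso
        subst hnil
        have : m = 0 := rfl
        rw [this] at hgt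
        have : (0:Int) ≤ (([]:List Char).count c : Int) := by positivity
        omega
      · refine Or.inr ⟨l, ?_, ?_, ?_, ?_⟩
        · simp [hgt, hsome]
        · have hcne : c ≠ l := by
            intro h; subst h; omega
          simp only [hgt, hcnt l]
          simp [Ne.symm hcne]
          omega
        · intro k
          simp only [hgt, hcnt k]
          have := hall k
          by_cases hkc : k = c <;> simp [hkc] <;> push_cast <;> omega
        · simpa [hgt] using h1

-- summing f over a nodup list with one element filtered out
lemma pvSum_filter_ne (f : Char → Int) (K : List Char) (hK : K.Nodup) (l : Char) (hl : l ∈ K) :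
    ((K.filter (fun k => !(k == l))).map f).sum = (K.map f).sum - f l := by
  induction K with
  | nil => cases hl
  | cons a K ih =>
    rcases List.mem_cons.mp hl with rfl | hlK
    · have hnot : l ∉ K := (List.nodup_cons.mp hK).1
      have : K.filter (fun k => !(k == l)) = K :=
        List.filter_eq_self.mpr (fun x hx => by simp; exact fun h => hnot (h ▸ hx))
      simp [this]
    · have hal : a ≠ l := by
        rintro rfl; exact (List.nodup_cons.mp hK).1 hlK
      simp [hal, ih (List.nodup_cons.mp hK).2 hlK]
      ring

lemma pvSum_map_cast (K : List Char) (g : Char → Nat) :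
    (K.map (fun k => (g k : Int))).sum = ((K.map g).sum : Int) := by
  induction K with
  | nil => simp
  | cons a K ih => simp [ih]

-- the counts in Counter(xs) sum to the length of xs
lemma pvSum_counts (xs : List Char) :
    ((PySem.Set.ofList xs).map (fun k => (xs.count k : Int))).sum = (xs.length : Int) := by
  have hperm : (PySem.Set.ofList xs : List Char).Perm xs.dedup := by
    rw [List.perm_ext_iff_of_nodup (PySem.Set.nodup_ofList xs) xs.nodup_dedup]
    intro a
    rw [PySem.Set.mem_ofList, List.mem_dedup]
  rw [List.Perm.sum_eq (hperm.map _), pvSum_map_cast]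
  exact_mod_cast congrArg (Nat.cast : Nat → Int) (List.sum_map_count_dedup_eq_length xs)

-- the values remaining after popping l sum to length - count l
lemma pvRest_eq (xs : List Char) (l : Char) (hl : l ∈ xs) :
    ((PySem.Dict.counter xs).erase l).values.sum = (xs.length : Int) - (xs.count l : Int) := by
  have hv : ((PySem.Dict.counter xs).erase l).values
      = (((PySem.Set.ofList xs).filter (fun k => !(k == l))).map (fun k => (xs.count k : Int))) := by
    show (((PySem.Dict.counter xs).items.filter (fun p => !(p.1 == l))).map (·.2)) = _
    rw [PySem.Dict.items_counter, List.filter_map]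
    simp [List.map_map, Function.comp_def]
  rw [hv, pvSum_filter_ne _ _ (PySem.Set.nodup_ofList xs) l ((PySem.Set.mem_ofList xs l).mpr hl),
    pvSum_counts]

-- two distinct letters cannot both occur more than half the time
lemma pvCount_add_count_le (xs : List Char) (l b : Char) (h : l ≠ b) :
    xs.count l + xs.count b ≤ xs.length := by
  induction xs with
  | nil => simp
  | cons a xs ih =>
    by_cases hla : l = a
    · subst hla
      have hbl : ¬ b = l := fun hh => h hh.symm
      simp [List.count_cons, h, hbl]
      omega
    · by_cases hba : b = a
      · subst hba
        have hlb : ¬ b = l := fun hh => h hh.symm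
        simp [List.count_cons, hla, hlb]
        omega
      · have hal : ¬ a = l := fun hh => hla hh.symm
        have hab : ¬ a = b := fun hh => hba hh.symm
        simp [List.count_cons, hal, hab]
        omega

-- ----- B side -----

-- splitting a sorted list at its head run: the run is exactly all copies of the head
lemma pvSplit (c : Char) (rest : List Char) (h : (c :: rest).Pairwise (· ≤ ·)) :
    rest.count c = (rest.takeWhile (· == c)).length ∧
    (∀ k, k ≠ c → (rest.dropWhile (· == c)).count k = rest.count k) ∧
    (rest.dropWhile (· == c)).count c = 0 ∧
    (rest.dropWhile (· == c)).Pairwise (· ≤ ·) := by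
  obtain ⟨hhead, hrest⟩ := List.pairwise_cons.mp h
  have hnotmem : c ∉ rest.dropWhile (· == c) := by
    intro hc
    rcases hdw : rest.dropWhile (· == c) with _ | ⟨d, t⟩
    · rw [hdw] at hc; cases hc
    · have hdc : (d == c) = false := by
        have := List.head_dropWhile_not (· == c) (l := rest) (by simp [hdw])
        simpa [hdw] using this
      have hdne : d ≠ c := by simpa using hdc
      have hdmem : d ∈ rest := (List.dropWhile_sublist (· == c)).mem (by rw [hdw]; exact List.mem_cons_self)
      have hcd : c ≤ d := hhead d hdmem
      have hdrop_pw : (rest.dropWhile (· == c)).Pairwise (· ≤ ·) :=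
        List.Pairwise.sublist (List.dropWhile_sublist (· == c)) hrest
      rw [hdw] at hc hdrop_pw
      rcases List.mem_cons.mp hc with rfl | hct
      · exact hdne rfl
      · have hdc' : d ≤ c := (List.pairwise_cons.mp hdrop_pw).1 c hct
        exact hdne (le_antisymm hdc' hcd)
  have htake_all : ∀ x ∈ rest.takeWhile (· == c), x = c := by
    intro x hx
    simpa using List.mem_takeWhile_imp hx
  have hsplit := List.takeWhile_append_dropWhile (p := (· == c)) (l := rest)
  refine ⟨?_, ?_, List.count_eq_zero.mpr hnotmem,
    List.Pairwise.sublist (List.dropWhile_sublist (· == c)) hrest⟩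
  · conv_lhs => rw [← hsplit]
    rw [List.count_append, List.count_eq_zero.mpr hnotmem, Nat.add_zero,
      List.count_eq_length.mpr (fun b hb => (htake_all b hb).symm)]
  · intro k hk
    conv_rhs => rw [← hsplit]
    rw [List.count_append]
    have : k ∉ rest.takeWhile (· == c) := fun hmem => hk (htake_all k hmem)
    rw [List.count_eq_zero.mpr this, Nat.zero_add]

-- B's run scan on a sorted list: the result dominates the initial best and every letter
-- count, and is either the untouched initial state or a letter with its exact count
lemma pvBestRunGo_spec (fuel : Nat) : ∀ (ys : List Char), ys.length ≤ fuel →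
    ys.Pairwise (· ≤ ·) → ∀ (best : Option Char) (bestLen : Int),
    bestLen ≤ (pvBestRunGo fuel ys (best, bestLen)).2 ∧
    (∀ k ∈ ys, (ys.count k : Int) ≤ (pvBestRunGo fuel ys (best, bestLen)).2) ∧
    (pvBestRunGo fuel ys (best, bestLen) = (best, bestLen) ∨
     ∃ b ∈ ys, (pvBestRunGo fuel ys (best, bestLen)).1 = some b ∧
       (pvBestRunGo fuel ys (best, bestLen)).2 = (ys.count b : Int)) := by
  induction fuel with
  | zero =>
    intro ys hlen _ best bestLen
    have : ys = [] := List.length_eq_zero_iff.mp (Nat.le_zero.mp hlen)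
    subst this
    exact ⟨le_refl _, fun k hk => absurd hk (List.not_mem_nil), Or.inl rfl⟩
  | succ fuel ih =>
    intro ys hlen hpw best bestLen
    rcases ys with _ | ⟨c, rest⟩
    · exact ⟨le_refl _, fun k hk => absurd hk (List.not_mem_nil), Or.inl rfl⟩
    obtain ⟨htake, hdropk, hdropc, hdroppw⟩ := pvSplit c rest hpw
    set ds := rest.dropWhile (· == c) with hds
    set L : Int := ((rest.takeWhile (· == c)).length : Int) + 1 with hL
    have hcntc : ((c :: rest).count c : Int) = L := by
      simp [List.count_cons, htake, hL]
    have hcnt_ne : ∀ k, k ≠ c → ((c :: rest).count k : Int) = (ds.count k : Int) := by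
      intro k hk
      have hck : ¬ c = k := fun hh => hk hh.symm
      simp [List.count_cons, hck, hdropk k hk]
    have hdslen : ds.length ≤ fuel := by
      have h1 : ds.length ≤ rest.length := List.length_dropWhile_le _ _
      have h2 : rest.length + 1 ≤ fuel + 1 := by simpa using hlen
      omega
    have hstep : pvBestRunGo (fuel + 1) (c :: rest) (best, bestLen)
        = pvBestRunGo fuel ds (if L > bestLen then (some c, L) else (best, bestLen)) := by
      simp only [pvBestRunGo, hL, hds]
    by_cases hgt : L > bestLen
    · have hst' : (if L > bestLen then (some c, L) else (best, bestLen)) = (some c, L) := by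
        simp [hgt]
      rw [hstep, hst']
      obtain ⟨h1, h2, h3⟩ := ih ds hdslen hdroppw (some c) L
      refine ⟨le_trans (le_of_lt hgt) h1, ?_, ?_⟩
      · intro k hk
        by_cases hkc : k = c
        · subst hkc; rw [hcntc]; exact h1
        · rw [hcnt_ne k hkc]
          have hkrest : k ∈ rest := by
            rcases List.mem_cons.mp hk with rfl | hkr
            · exact absurd rfl hkc
            · exact hkr
          by_cases hkds : k ∈ ds
          · exact h2 k hkds
          · rw [List.count_eq_zero.mpr hkds]
            have hlen0 : (0:Int) ≤ ((rest.takeWhile (· == c)).length : Int) := by positivity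
            have hL0 : (0:Int) ≤ L := by omega
            push_cast
            exact le_trans hL0 h1
      · rcases h3 with heq | ⟨b, hb, hb1, hb2⟩
        · refine Or.inr ⟨c, List.mem_cons_self, ?_, ?_⟩
          · rw [heq]
          · rw [heq, ← hcntc]
        · have hbc : b ≠ c := by
            intro hh; subst hh
            have : ds.count b = 0 := hdropc
            have hbpos : 0 < ds.count b := List.count_pos_iff.mpr hb
            omega
          refine Or.inr ⟨b, List.mem_cons.mpr (Or.inr ((List.dropWhile_sublist (· == c)).mem hb)), hb1, ?_⟩
          rw [hb2, ← hcnt_ne b hbc]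
    · have hst' : (if L > bestLen then (some c, L) else (best, bestLen)) = (best, bestLen) := by
        simp [hgt]
      rw [hstep, hst']
      obtain ⟨h1, h2, h3⟩ := ih ds hdslen hdroppw best bestLen
      refine ⟨h1, ?_, ?_⟩
      · intro k hk
        by_cases hkc : k = c
        · subst hkc; rw [hcntc]
          exact le_trans (not_lt.mp hgt) h1
        · rw [hcnt_ne k hkc]
          by_cases hkds : k ∈ ds
          · exact h2 k hkds
          · rw [List.count_eq_zero.mpr hkds]
            push_cast
            have hL0 : (0:Int) < L := by
              have : (0:Int) ≤ ((rest.takeWhile (· == c)).length : Int) := by positivity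
              omega
            omega
      · rcases h3 with heq | ⟨b, hb, hb1, hb2⟩
        · exact Or.inl heq
        · have hbc : b ≠ c := by
            intro hh; subst hh
            have : ds.count b = 0 := hdropc
            have hbpos : 0 < ds.count b := List.count_pos_iff.mpr hb
            omega
          refine Or.inr ⟨b, List.mem_cons.mpr (Or.inr ((List.dropWhile_sublist (· == c)).mem hb)), hb1, ?_⟩
          rw [hb2, ← hcnt_ne b hbc]

-- ----- combining the two -----

lemma pvMain (letters : String) (hpre : letters ≠ "") :
    getHappyLetter letters = getHappyLetter_alt letters := by
  set xs := letters.toList with hxs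
  have hne : xs ≠ [] := fun h => hpre (String.toList_eq_nil_iff.mp h)
  -- A side
  obtain ⟨hd, hinv⟩ := pvFoldA_inv xs
  rcases hinv with ⟨_, hnil⟩ | ⟨l, hsome, hcl, hall, h1⟩
  · exact absurd hnil hne
  set m := (xs.foldl pvStepA (PySem.Dict.empty, none, 0)).2.2 with hm
  have hlxs : l ∈ xs := by
    have h0 : 0 < xs.count l := by omega
    exact List.count_pos_iff.mp h0
  have hcont : (PySem.Dict.counter xs).contains l = true := by
    rw [PySem.Dict.contains_iff_mem_keys, PySem.Dict.keys_counter, PySem.Set.mem_ofList]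
    exact hlxs
  obtain ⟨v, hv⟩ : ∃ v, (PySem.Dict.counter xs).get? l = some v := by
    have hh := PySem.Dict.contains_eq_isSome_get? (PySem.Dict.counter xs) l
    rw [hcont] at hh
    exact Option.isSome_iff_exists.mp hh.symm
  have hpop : (PySem.Dict.counter xs).pop? l = some (v, (PySem.Dict.counter xs).erase l) := by
    simp [PySem.Dict.pop?, hv]
  have hA : getHappyLetter letters
      = (if m > ((xs.length : Int) - (xs.count l : Int)) then String.singleton l else ".") := by
    unfold getHappyLetter
    simp only [← hxs, hsome, hd, hpop, ← hm, pvRest_eq xs l hlxs]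
  -- B side
  set s := PySem.List.sorted xs (fun x => x) false with hs
  have hperm : s.Perm xs := PySem.List.sorted_perm xs (fun x => x) false
  have hpw : s.Pairwise (· ≤ ·) := by
    simpa using PySem.List.sorted_pairwise xs (fun x => x)
  have hsne : s ≠ [] := by
    intro hh
    have hp2 : xs.Perm ([] : List Char) := by rw [← hh]; exact hperm.symm
    exact hne hp2.eq_nil
  obtain ⟨h1, h2, h3⟩ := pvBestRunGo_spec s.length s (le_refl _) hpw none 0
  set r := pvBestRunGo s.length s (none, 0) with hr
  obtain ⟨c0, cs, hcons⟩ := List.exists_cons_of_ne_nil hsne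
  have hc0 : 0 < s.count c0 := List.count_pos_iff.mpr (by rw [hcons]; exact List.mem_cons_self)
  rcases h3 with heq | ⟨b, hbmem, hb1, hb2⟩
  · exfalso
    have := h2 c0 (by rw [hcons]; exact List.mem_cons_self)
    rw [heq] at this
    simp only at this
    omega
  have hbxs : b ∈ xs := hperm.mem_iff.mp hbmem
  have hcount_s : ∀ k : Char, s.count k = xs.count k := fun k => hperm.count_eq k
  have hble : ∀ y ∈ xs, ((xs.count y : Int)) ≤ (xs.count b : Int) := by
    intro y hy
    have hh := h2 y (hperm.mem_iff.mpr hy)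
    rw [hb2, hcount_s y, hcount_s b] at hh
    exact hh
  have hmb : (xs.count b : Int) = m := by
    have h2' := hall b
    have h3' := hble l hlxs
    omega
  have hB : getHappyLetter_alt letters
      = (if 2 * (xs.count b : Int) > (xs.length : Int) then String.singleton b else ".") := by
    unfold getHappyLetter_alt
    simp only [← hxs, ← hs, ← hr]
    rw [hb2, hcount_s b]
    simp only [PySem.Str.len_eq, ← hxs]
    by_cases hc2 : 2 * (xs.count b : Int) > (xs.length : Int)
    · rw [if_pos hc2, if_pos hc2, hb1]
    · rw [if_neg hc2, if_neg hc2]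
  rw [hA, hB]
  have hclm : (xs.count l : Int) = m := hcl
  by_cases hc2 : 2 * m > (xs.length : Int)
  · rw [if_pos (by omega), if_pos (by omega)]
    have hlb : l = b := by
      by_contra hne2
      have := pvCount_add_count_le xs l b hne2
      omega
    rw [hlb]
  · rw [if_neg (by omega), if_neg (by omega)]

-- ===== VERDICT (by name: the statement is the Claim_ definition above) =====
theorem getHappyLetter_spec : Claim_equal_getHappyLetter := by
  intro letters _ hpre
  show getHappyLetter letters = getHappyLetter_alt letters
  exact pvMain letters hpre
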